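-- pv_equiv track=rewrite | github.com/FastLED/FastLED | ci/lint_cpp/include_paths_checker.py | is_fastled_platform_relative
-- ===== SOURCE A (Python) =====
-- AMBIGUOUS_PREFIXES = (
--     "avr/",  # Could be <avr/io.h> (SDK) or "platforms/avr/clockless.h" (FastLED)
--     "arm/",  # Could be <arm/math.h> (SDK) or "platforms/arm/fastpin.h" (FastLED)
-- )
--
-- FASTLED_PLATFORM_SUBDIRS = (
--     "adafruit/",
--     "apollo3/",
--     "arm/",
--     "avr/",
--     "esp/",
--     "shared/",
--     "stub/",
--     "wasm/",
--     "posix/",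
-- )
--
-- def looks_like_fastled_code(include_path: str) -> bool:
--     """Check if the include path looks like FastLED code (not SDK code).
--
--     FastLED code characteristics:
--     - Uses .hpp extension (SDK headers almost never use this)
--     - Uses .cpp extension (should never be included)
--     - Has FastLED-specific naming patterns
--     """
--     # .hpp is almost exclusively used by FastLED, not SDK headers
--     if include_path.endswith(".hpp"):
--         return True
--
--     # .cpp files should never be included as headers
--     if include_path.endswith(".cpp"):
--         return True
--
--     # Common FastLED naming patterns
--     fastled_patterns = (
--         "clockless",
--         "fastpin",
--         "fastspi",
--         "led_sysdefs",
--         "compile_test",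
--         "spi_output",
--         "is_",  # Platform detection headers like is_avr.h, is_arm.h
--     )
--     filename = include_path.split("/")[-1]
--     for pattern in fastled_patterns:
--         if pattern in filename.lower():
--             return True
--
--     return False
--
-- def is_fastled_platform_relative(include_path: str) -> bool:
--     """Check if the include path looks like a relative include to FastLED platform code.
--
--     These are paths that should use "platforms/" prefix but don't.
--     For example: "esp/foo.h" should be "platforms/esp/foo.h"
--
--     For ambiguous prefixes like avr/ and arm/, we only flag them as FastLED
--     platform code if they look like FastLED code (e.g., .hpp files, specific
--     FastLED naming patterns).
--     """
--     # Check unambiguous FastLED platform subdirs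
--     for subdir in FASTLED_PLATFORM_SUBDIRS:
--         if include_path.startswith(subdir):
--             return True
--
--     # For ambiguous prefixes, check if it looks like FastLED code
--     for prefix in AMBIGUOUS_PREFIXES:
--         if include_path.startswith(prefix):
--             if looks_like_fastled_code(include_path):
--                 return True
--
--     return False
-- ===== SOURCE B (Python) =====
-- _PLATFORM_SEGMENTS = {
--     "adafruit", "apollo3", "arm", "avr", "esp",
--     "shared", "stub", "wasm", "posix",
-- }
--
--
-- def is_fastled_platform_relative(include_path: str) -> bool:
--     i = include_path.find("/")
--     return i != -1 and include_path[:i] in _PLATFORM_SEGMENTS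
-- ===== Notes on version B (the rewrite author's own statement) =====
-- stated objective: idiomatic
-- what changed: A scans nine platform prefixes with startswith and then re-tests two ambiguous prefixes in a pass that is unreachable because both already occur among the platform subdirs; B instead locates the first slash once and looks the leading path segment up in a set of segment names, so the prefix scan and the dead looks_like_fastled_code path disappear.
import Mathlib
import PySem

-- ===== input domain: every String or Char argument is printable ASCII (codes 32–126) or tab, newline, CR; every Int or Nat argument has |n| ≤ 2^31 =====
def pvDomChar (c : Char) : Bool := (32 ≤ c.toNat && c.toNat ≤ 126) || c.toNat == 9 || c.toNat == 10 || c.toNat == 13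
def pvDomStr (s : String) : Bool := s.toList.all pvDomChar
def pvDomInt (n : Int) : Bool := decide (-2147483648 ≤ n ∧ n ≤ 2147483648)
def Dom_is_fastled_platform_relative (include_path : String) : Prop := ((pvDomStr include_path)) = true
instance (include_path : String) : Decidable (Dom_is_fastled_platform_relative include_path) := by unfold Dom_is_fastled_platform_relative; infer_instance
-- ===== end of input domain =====

-- unreachable, since "avr/" and "arm/" are already platform subdirs) by one find('/')
-- plus a set lookup of the leading segment; equivalence of the return values is proved.

-- ===== PORT A =====
def AMBIGUOUS_PREFIXES : List String := ["avr/", "arm/"]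

def FASTLED_PLATFORM_SUBDIRS : List String :=
  ["adafruit/", "apollo3/", "arm/", "avr/", "esp/", "shared/", "stub/", "wasm/", "posix/"]

def looks_like_fastled_code (include_path : String) : Bool :=
  if PySem.Str.endswith include_path ".hpp" then true
  else if PySem.Str.endswith include_path ".cpp" then true
  else
    let fastled_patterns : List String :=
      ["clockless", "fastpin", "fastspi", "led_sysdefs", "compile_test", "spi_output", "is_"]
    -- include_path.split("/")[-1]: sep "/" ≠ "" so split? is always `some`; the result is
    -- nonempty, so the (-1) index never misses and the "" default is never used.
    let filename := PySem.List.pyGetD ((PySem.Str.split? include_path "/").getD []) (-1) ""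
    fastled_patterns.any (fun pattern => PySem.Str.isIn pattern (PySem.Str.lower filename))

def is_fastled_platform_relative (include_path : String) : Bool :=
  if FASTLED_PLATFORM_SUBDIRS.any (fun subdir => PySem.Str.startswith include_path subdir) then
    true
  else if AMBIGUOUS_PREFIXES.any (fun pre =>
      PySem.Str.startswith include_path pre && looks_like_fastled_code include_path) then
    true
  else
    false

-- ===== PORT B =====
def PLATFORM_SEGMENTS : PySem.Set String :=
  PySem.Set.ofList ["adafruit", "apollo3", "arm", "avr", "esp", "shared", "stub", "wasm", "posix"]

def is_fastled_platform_relative_alt (include_path : String) : Bool :=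
  let i := PySem.Str.find include_path "/"
  i != -1 && PySem.Set.contains PLATFORM_SEGMENTS (PySem.Str.slice include_path none (some i))

-- ===== PRECONDITION & SPEC =====
def Spec_is_fastled_platform_relative (include_path : String) (out : Bool) : Prop := out = is_fastled_platform_relative_alt include_path
instance (include_path : String) (out : Bool) : Decidable (Spec_is_fastled_platform_relative include_path out) := by unfold Spec_is_fastled_platform_relative; infer_instance

-- ===== CLAIM (what is proved, stated in full; the proofs are below) =====
def Claim_equal_is_fastled_platform_relative : Prop := ∀ (include_path : String), Dom_is_fastled_platform_relative include_path → Spec_is_fastled_platform_relative include_path (is_fastled_platform_relative include_path)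

-- ===== LEMMAS AND PROOFS =====

-- If a slash-free segment s followed by '/' is a prefix of cs, the first '/' in cs sits

theorem find_slash_of_prefix (cs s : List Char) (hs : '/' ∉ s)
    (h : (s ++ ['/']) <+: cs) : PySem.Chars.find cs ['/'] = (s.length : Int) := by
  obtain ⟨t, ht⟩ := h
  have hinf : (['/'] : List Char) <:+: cs := ⟨s, t, by simpa using ht⟩
  have hnn : 0 ≤ PySem.Chars.find cs ['/'] := (PySem.Chars.find_nonneg_iff cs ['/']).mpr hinf
  obtain ⟨hpre, hmin⟩ := PySem.Chars.find_spec hnn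
  set k := (PySem.Chars.find cs ['/']).toNat with hk
  have hdrop : cs.drop s.length = '/' :: t := by
    rw [← ht]; simp
  have hat : (['/'] : List Char) <+: cs.drop s.length := by rw [hdrop]; exact ⟨t, rfl⟩
  have h1 : k ≤ s.length := not_lt.mp (fun hl => hmin s.length hl hat)
  have h2 : ¬ k < s.length := by
    intro hl
    obtain ⟨u, hu⟩ := hpre
    have hget : cs[k]? = some '/' := by
      have : (cs.drop k)[0]? = some '/' := by rw [← hu]; rfl
      simpa [List.getElem?_drop] using this
    have hget2 : cs[k]? = s[k]? := by
      rw [← ht]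
      rw [List.getElem?_append_left (by simp; omega)]
      rw [List.getElem?_append_left (by omega)]
    have : s[k]? = some '/' := hget2 ▸ hget
    exact hs (List.mem_of_getElem? this)
  have hkeq : k = s.length := le_antisymm h1 (not_lt.mp h2)
  omega

theorem prefix_of_find (cs : List Char) (h : 0 ≤ PySem.Chars.find cs ['/']) :
    (cs.take (PySem.Chars.find cs ['/']).toNat ++ ['/']) <+: cs := by
  obtain ⟨hpre, _⟩ := PySem.Chars.find_spec h
  obtain ⟨u, hu⟩ := hpre
  refine ⟨u, ?_⟩
  calc (cs.take (PySem.Chars.find cs ['/']).toNat ++ ['/']) ++ u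
      = cs.take (PySem.Chars.find cs ['/']).toNat ++ (['/'] ++ u) := by simp
    _ = cs.take (PySem.Chars.find cs ['/']).toNat
          ++ cs.drop (PySem.Chars.find cs ['/']).toNat := by rw [hu]
    _ = cs := List.take_append_drop _ _

theorem seg_iff (p seg : String) (hs : '/' ∉ seg.toList) :
    PySem.Str.startswith p (seg ++ "/") = true ↔
      0 ≤ PySem.Str.find p "/" ∧
        PySem.Str.slice p none (some (PySem.Str.find p "/")) = seg := by
  have hf : PySem.Str.find p "/" = PySem.Chars.find p.toList ['/'] := by simp
  constructor
  · intro h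
    have hpre : (seg.toList ++ ['/']) <+: p.toList := by
      have := (PySem.Chars.startswith_iff p.toList (seg ++ "/").toList).mp (by simpa using h)
      simpa [String.toList_append] using this
    have hfind := find_slash_of_prefix p.toList seg.toList hs hpre
    refine ⟨by rw [hf, hfind]; positivity, ?_⟩
    apply String.toList_inj.mp
    rw [PySem.Str.toList_slice, PySem.Chars.slice_eq_listSlice, hf, hfind,
      PySem.List.slice_to _ (Int.natCast_nonneg _)]
    have : seg.toList <+: p.toList := (List.prefix_append _ _).trans hpre
    simpa using (List.prefix_iff_eq_take.mp this).symm
  · rintro ⟨h0, hsl⟩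
    rw [hf] at h0
    have htake : p.toList.take (PySem.Chars.find p.toList ['/']).toNat = seg.toList := by
      have := congrArg String.toList hsl
      rwa [PySem.Str.toList_slice, PySem.Chars.slice_eq_listSlice, hf,
        PySem.List.slice_to _ h0] at this
    have := prefix_of_find p.toList h0
    rw [htake] at this
    rw [PySem.Str.startswith_eq]
    exact (PySem.Chars.startswith_iff _ _).mpr (by simpa [String.toList_append] using this)

theorem A_eq_any (p : String) : is_fastled_platform_relative p =
    FASTLED_PLATFORM_SUBDIRS.any (fun subdir => PySem.Str.startswith p subdir) := by
  unfold is_fastled_platform_relative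
  split_ifs with h1 h2
  · exact h1.symm
  · exfalso
    simp [FASTLED_PLATFORM_SUBDIRS, AMBIGUOUS_PREFIXES] at h1 h2
    rcases h2 with ⟨h, -⟩ | ⟨h, -⟩ <;> simp_all
  · simp only [Bool.not_eq_true] at h1
    exact h1.symm

theorem main_thm (p : String) :
    is_fastled_platform_relative p = is_fastled_platform_relative_alt p := by
  have e1 := seg_iff p "adafruit" (by decide)
  have e2 := seg_iff p "apollo3" (by decide)
  have e3 := seg_iff p "arm" (by decide)
  have e4 := seg_iff p "avr" (by decide)
  have e5 := seg_iff p "esp" (by decide)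
  have e6 := seg_iff p "shared" (by decide)
  have e7 := seg_iff p "stub" (by decide)
  have e8 := seg_iff p "wasm" (by decide)
  have e9 := seg_iff p "posix" (by decide)
  simp only [PySem.Str.find_eq, show ("/" : String).toList = ['/'] from rfl,
    show ("adafruit" ++ "/" : String) = "adafruit/" from rfl,
    show ("apollo3" ++ "/" : String) = "apollo3/" from rfl,
    show ("arm" ++ "/" : String) = "arm/" from rfl,
    show ("avr" ++ "/" : String) = "avr/" from rfl,
    show ("esp" ++ "/" : String) = "esp/" from rfl,
    show ("shared" ++ "/" : String) = "shared/" from rfl,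
    show ("stub" ++ "/" : String) = "stub/" from rfl,
    show ("wasm" ++ "/" : String) = "wasm/" from rfl,
    show ("posix" ++ "/" : String) = "posix/" from rfl] at e1 e2 e3 e4 e5 e6 e7 e8 e9
  have hge : -1 ≤ PySem.Chars.find p.toList ['/'] := PySem.Chars.neg_one_le_find _ _
  have hne : (¬PySem.Chars.find p.toList ['/'] = -1) ↔ 0 ≤ PySem.Chars.find p.toList ['/'] := by
    omega
  have hseg : PLATFORM_SEGMENTS =
      ["adafruit", "apollo3", "arm", "avr", "esp", "shared", "stub", "wasm", "posix"] := by decide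
  rw [A_eq_any, Bool.eq_iff_iff]
  simp only [FASTLED_PLATFORM_SUBDIRS, List.any_cons, List.any_nil, Bool.or_eq_true,
    Bool.false_eq_true, or_false]
  simp only [is_fastled_platform_relative_alt, hseg, PySem.Set.contains, Bool.and_eq_true,
    bne_iff_ne, ne_eq, List.contains_eq_mem, List.mem_cons, List.not_mem_nil, or_false,
    decide_eq_true_eq, PySem.Str.find_eq, show ("/" : String).toList = ['/'] from rfl]
  rw [hne]
  constructor
  · rintro (h|h|h|h|h|h|h|h|h)
    · exact ⟨(e1.mp h).1, Or.inl (e1.mp h).2⟩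
    · exact ⟨(e2.mp h).1, Or.inr (Or.inl (e2.mp h).2)⟩
    · exact ⟨(e3.mp h).1, Or.inr (Or.inr (Or.inl (e3.mp h).2))⟩
    · exact ⟨(e4.mp h).1, Or.inr (Or.inr (Or.inr (Or.inl (e4.mp h).2)))⟩
    · exact ⟨(e5.mp h).1, Or.inr (Or.inr (Or.inr (Or.inr (Or.inl (e5.mp h).2))))⟩
    · exact ⟨(e6.mp h).1, Or.inr (Or.inr (Or.inr (Or.inr (Or.inr (Or.inl (e6.mp h).2)))))⟩
    · exact ⟨(e7.mp h).1, Or.inr (Or.inr (Or.inr (Or.inr (Or.inr (Or.inr (Or.inl (e7.mp h).2))))))⟩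
    · exact ⟨(e8.mp h).1, Or.inr (Or.inr (Or.inr (Or.inr (Or.inr (Or.inr (Or.inr (Or.inl (e8.mp h).2)))))))⟩
    · exact ⟨(e9.mp h).1, Or.inr (Or.inr (Or.inr (Or.inr (Or.inr (Or.inr (Or.inr (Or.inr (e9.mp h).2)))))))⟩
  · rintro ⟨h0, (h|h|h|h|h|h|h|h|h)⟩
    · exact Or.inl (e1.mpr ⟨h0, h⟩)
    · exact Or.inr (Or.inl (e2.mpr ⟨h0, h⟩))
    · exact Or.inr (Or.inr (Or.inl (e3.mpr ⟨h0, h⟩)))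
    · exact Or.inr (Or.inr (Or.inr (Or.inl (e4.mpr ⟨h0, h⟩))))
    · exact Or.inr (Or.inr (Or.inr (Or.inr (Or.inl (e5.mpr ⟨h0, h⟩)))))
    · exact Or.inr (Or.inr (Or.inr (Or.inr (Or.inr (Or.inl (e6.mpr ⟨h0, h⟩))))))
    · exact Or.inr (Or.inr (Or.inr (Or.inr (Or.inr (Or.inr (Or.inl (e7.mpr ⟨h0, h⟩)))))))
    · exact Or.inr (Or.inr (Or.inr (Or.inr (Or.inr (Or.inr (Or.inr (Or.inl (e8.mpr ⟨h0, h⟩))))))))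
    · exact Or.inr (Or.inr (Or.inr (Or.inr (Or.inr (Or.inr (Or.inr (Or.inr (e9.mpr ⟨h0, h⟩))))))))

theorem is_fastled_platform_relative_spec : Claim_equal_is_fastled_platform_relative := by
  intro p _
  unfold Spec_is_fastled_platform_relative
  exact main_thm p
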